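-- pv_equiv track=rewrite | github.com/jamafyna/npfl068_3ass | functions.py | fix_sentence_boundaries
-- ===== SOURCE A (Python) =====
-- def fix_sentence_boundaries(data):
--     # remove leading and final divisions
--     while data[0] == ('###', '###'):
--         data.pop(0)
--     while data[-1] == ('###', '###'):
--         data.pop()
--     fixed_data = []
--     sentence = []
--     for e in data:
--         if e != ('###', '###'):
--             sentence.append(e)
--         else:
--             fixed_data.append([('###', '###'), ('###', '###')] + sentence + [('###', '###'), ('###', '###')])
--             sentence = []
--     if sentence:
--         fixed_data.append([('###', '###'), ('###', '###')] + sentence + [('###', '###'), ('###', '###')])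
--     return fixed_data
-- ===== SOURCE B (Python) =====
-- def fix_sentence_boundaries(data):
--     # index-table-then-slice decomposition; does not mutate `data` (A pops from it):
--     # equivalence is about the return value only
--     M = ('###', '###')
--     n = len(data)
--     lo = 0
--     while lo < n and data[lo] == M:
--         lo += 1
--     hi = n
--     while hi > lo and data[hi - 1] == M:
--         hi -= 1
--     core = data[lo:hi]
--     if not core:
--         return []
--     pad = [M, M]
--     marks = [i for i, e in enumerate(core) if e == M]
--     out = []
--     prev = -1
--     for m in marks + [len(core)]:
--         out.append(pad + core[prev + 1:m] + pad)
--         prev = m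
--     return out
-- ===== Notes on version B (the rewrite author's own statement) =====
-- stated objective: alternative
-- what changed: Replaces A's stateful flush loop (accumulating a current sentence and appending it at each marker) by an index-table-then-slice pass: compute the marker positions, then emit each padded sentence as a slice between consecutive boundaries; B also does not mutate its argument (A pops from it), the equivalence is about the return value.
import Mathlib
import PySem

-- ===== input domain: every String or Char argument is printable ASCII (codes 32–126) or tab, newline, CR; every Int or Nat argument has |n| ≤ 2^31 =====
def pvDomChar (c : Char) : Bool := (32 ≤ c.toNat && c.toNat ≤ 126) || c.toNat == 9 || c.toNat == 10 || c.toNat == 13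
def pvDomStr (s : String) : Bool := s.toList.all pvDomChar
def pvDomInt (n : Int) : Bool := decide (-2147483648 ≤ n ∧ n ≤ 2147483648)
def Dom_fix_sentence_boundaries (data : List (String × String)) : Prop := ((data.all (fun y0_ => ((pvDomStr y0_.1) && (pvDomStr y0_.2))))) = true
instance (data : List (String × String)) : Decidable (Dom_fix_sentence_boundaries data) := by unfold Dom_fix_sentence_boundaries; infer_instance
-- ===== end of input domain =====

-- B replaces A's stateful flush loop by an index-table-then-slice pass (marker positions, then
-- slices between consecutive boundaries); A mutates `data` (pops from it), B does not — the
-- equivalence proved here is about the return value only.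


def pvM : String × String := ("###", "###")
def pvPad : List (String × String) := [pvM, pvM]

-- ===== PORT A =====
-- while data[0] == ('###','###'): data.pop(0)   (none = IndexError on the empty list)
def stripFront : List (String × String) → Option (List (String × String))
  | [] => none
  | x :: xs => if x = pvM then stripFront xs else some (x :: xs)

-- while data[-1] == ('###','###'): data.pop()   (none = IndexError on the empty list)
def stripBack (l : List (String × String)) : Option (List (String × String)) :=
  match h : l.getLast? with
  | none => none
  | some x => if x = pvM then stripBack l.dropLast else some l
termination_by l.length
decreasing_by
  cases l with
  | nil => simp at h
  | cons a as => simp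

-- the body of the for-loop: state = (fixed_data, sentence)
def stepA (st : List (List (String × String)) × List (String × String)) (e : String × String) :
    List (List (String × String)) × List (String × String) :=
  if e ≠ pvM then (st.1, st.2 ++ [e])
  else (st.1 ++ [pvPad ++ st.2 ++ pvPad], [])

def fix_sentence_boundaries (data : List (String × String)) : List (List (String × String)) :=
  match stripFront data with
  | none => []          -- IndexError (excluded by Pre_)
  | some d1 =>
    match stripBack d1 with
    | none => []        -- IndexError (excluded by Pre_)
    | some d2 =>
      let st := d2.foldl stepA ([], [])
      if st.2 ≠ [] then st.1 ++ [pvPad ++ st.2 ++ pvPad] else st.1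

-- ===== PORT B =====
-- lo / hi while-loops: count of leading markers (applied to the list resp. its reverse)
def cntLead : List (String × String) → Nat
  | [] => 0
  | x :: xs => if x = pvM then cntLead xs + 1 else 0

-- marks = [i for i, e in enumerate(core) if e == ('###','###')]
def marksB (core : List (String × String)) : List Int :=
  (PySem.List.enumerate core 0).filterMap (fun p => if p.2 = pvM then some p.1 else none)

-- for m in marks + [len(core)]: out.append(pad + core[prev+1:m] + pad); prev = m
def bLoop (core : List (String × String)) : Int → List Int → List (List (String × String))
  | _, [] => []
  | prev, m :: ms =>
      (pvPad ++ PySem.List.slice core (some (prev + 1)) (some m) ++ pvPad) :: bLoop core m ms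

def fix_sentence_boundaries_alt (data : List (String × String)) : List (List (String × String)) :=
  let lo := cntLead data
  let t := cntLead (data.drop lo).reverse
  let core := (data.drop lo).take (data.length - t - lo)   -- core = data[lo:hi], hi = n - t
  if core = [] then []
  else bLoop core (-1) (marksB core ++ [(core.length : Int)])

-- ===== PRECONDITION & SPEC =====
-- Pre_ excludes exactly the inputs on which A raises IndexError: lists whose every element is
-- ('###','###') (including the empty list) — the stripping loops empty the list, then index it.
def Pre_fix_sentence_boundaries (data : List (String × String)) : Prop :=
  ∃ e ∈ data, e ≠ pvM
instance (data : List (String × String)) : Decidable (Pre_fix_sentence_boundaries data) := by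
  unfold Pre_fix_sentence_boundaries; infer_instance

def pvWitness_fix_sentence_boundaries : (List (String × String)) := [("a", "N")]

def Spec_fix_sentence_boundaries (data : List (String × String)) (out : List (List (String × String))) : Prop := out = fix_sentence_boundaries_alt data
instance (data : List (String × String)) (out : List (List (String × String))) : Decidable (Spec_fix_sentence_boundaries data out) := by unfold Spec_fix_sentence_boundaries; infer_instance

-- ===== CLAIM (what is proved, stated in full; the proofs are below) =====
def Claim_equal_fix_sentence_boundaries : Prop := ∀ (data : List (String × String)), Dom_fix_sentence_boundaries data → Pre_fix_sentence_boundaries data → Spec_fix_sentence_boundaries data (fix_sentence_boundaries data)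

-- ===== LEMMAS AND PROOFS =====

-- the common value both sides compute: the list of chunks of `core` between markers
def chunks : List (String × String) → List (List (String × String))
  | [] => [[]]
  | x :: xs =>
    if x = pvM then [] :: chunks xs
    else match chunks xs with
      | [] => [[x]]
      | c :: cs => (x :: c) :: cs

def padFn (s : List (String × String)) : List (String × String) := pvPad ++ s ++ pvPad

def pvP (x : String × String) : Bool := decide (x = pvM)

lemma chunks_ne_nil (l : List (String × String)) : chunks l ≠ [] := by
  induction l with
  | nil => simp [chunks]
  | cons x xs ih =>
    simp only [chunks]
    split_ifs
    · simp
    · cases h : chunks xs <;> simp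


lemma stripFront_eq (l : List (String × String)) (h : ∃ e ∈ l, e ≠ pvM) :
    stripFront l = some (l.dropWhile pvP) := by
  induction l with
  | nil => simp at h
  | cons x xs ih =>
    by_cases hx : x = pvM
    · simp only [stripFront, hx, List.dropWhile_cons, pvP, decide_eq_true_eq, if_true]
      apply ih
      obtain ⟨e, he, hne⟩ := h
      rcases List.mem_cons.1 he with rfl | he'
      · exact absurd hx hne
      · exact ⟨e, he', hne⟩
    · simp [stripFront, hx, List.dropWhile_cons, pvP]


lemma stripBack_rev (r : List (String × String)) (h : ∃ e ∈ r, e ≠ pvM) :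
    stripBack r.reverse = some ((r.dropWhile pvP).reverse) := by
  induction r with
  | nil => simp at h
  | cons x xs ih =>
    rw [stripBack]
    split
    · next hnone =>
      rw [List.reverse_cons, List.getLast?_concat] at hnone
      exact absurd hnone (by simp)
    · next y hy =>
      rw [List.reverse_cons, List.getLast?_concat, Option.some.injEq] at hy
      subst hy
      rw [List.reverse_cons, List.dropLast_concat]
      by_cases hx : x = pvM
      · rw [if_pos hx]
        have h' : ∃ e ∈ xs, e ≠ pvM := by
          obtain ⟨e, he, hne⟩ := h
          rcases List.mem_cons.1 he with rfl | he'
          · exact absurd hx hne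
          · exact ⟨e, he', hne⟩
        rw [ih h']
        simp [List.dropWhile_cons, pvP, hx]
      · rw [if_neg hx]
        simp [List.dropWhile_cons, pvP, hx]

lemma cntLead_eq (l : List (String × String)) : cntLead l = (l.takeWhile pvP).length := by
  induction l with
  | nil => simp [cntLead]
  | cons x xs ih => by_cases hx : x = pvM <;> simp [cntLead, List.takeWhile_cons, pvP, hx, ih]


-- consHead s cs prepends s to the first chunk
def consHead (s : List (String × String)) : List (List (String × String)) → List (List (String × String))
  | [] => [s]
  | c :: cs => (s ++ c) :: cs

lemma foldA (l : List (String × String)) (fd : List (List (String × String))) (s : List (String × String)) :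
    l.foldl stepA (fd, s) =
      (fd ++ ((consHead s (chunks l)).dropLast).map padFn,
       ((consHead s (chunks l)).getLast?).getD []) := by
  induction l generalizing fd s with
  | nil => simp [chunks, consHead]
  | cons x xs ih =>
    rw [List.foldl_cons]
    obtain ⟨c, cs, hc⟩ : ∃ c cs, chunks xs = c :: cs := by
      cases h : chunks xs with
      | nil => exact absurd h (chunks_ne_nil xs)
      | cons c cs => exact ⟨c, cs, rfl⟩
    by_cases hx : x = pvM
    · have hstep : stepA (fd, s) x = (fd ++ [padFn s], []) := by simp [stepA, hx, padFn]
      rw [hstep, ih]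
      simp [chunks, hx, hc, consHead]
    · have hstep : stepA (fd, s) x = (fd, s ++ [x]) := by simp [stepA, hx]
      rw [hstep, ih]
      simp [chunks, hx, hc, consHead]


lemma chunks_cons_mark (xs : List (String × String)) : chunks (pvM :: xs) = [] :: chunks xs := by
  simp [chunks]

lemma chunks_cons_tok (x : String × String) (xs : List (String × String)) (hx : x ≠ pvM)
    (c : List (String × String)) (cs : List (List (String × String))) (h : chunks xs = c :: cs) :
    chunks (x :: xs) = (x :: c) :: cs := by
  simp [chunks, hx, h]

lemma chunks_getLast_ne_nil (l : List (String × String)) (hne : l ≠ [])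
    (hl : l.getLast? ≠ some pvM) : (chunks l).getLast? ≠ some [] := by
  induction l with
  | nil => exact absurd rfl hne
  | cons x xs ih =>
    cases xs with
    | nil =>
      have hx : x ≠ pvM := by simpa using hl
      simp [chunks, hx]
    | cons y ys =>
      have hl' : (y :: ys).getLast? ≠ some pvM := by rwa [List.getLast?_cons_cons] at hl
      have ihh := ih (by simp) hl'
      obtain ⟨c, cs, hcc⟩ : ∃ c cs, chunks (y :: ys) = c :: cs := by
        cases h : chunks (y :: ys) with
        | nil => exact absurd h (chunks_ne_nil _)
        | cons c cs => exact ⟨c, cs, rfl⟩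
      rw [hcc] at ihh
      by_cases hx : x = pvM
      · subst hx
        rw [chunks_cons_mark, hcc]
        simpa [List.getLast?_cons_cons] using ihh
      · rw [chunks_cons_tok x _ hx c cs hcc]
        cases cs with
        | nil => simp
        | cons c2 cs2 => simpa [List.getLast?_cons_cons] using ihh


def chunksIdx (core : List (String × String)) : Int → List Int → List (List (String × String))
  | _, [] => []
  | p, m :: ms => PySem.List.slice core (some (p + 1)) (some m) :: chunksIdx core m ms

lemma bLoop_eq (core : List (String × String)) (p : Int) (ms : List Int) :
    bLoop core p ms = (chunksIdx core p ms).map padFn := by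
  induction ms generalizing p with
  | nil => simp [bLoop, chunksIdx]
  | cons m ms ih => simp [bLoop, chunksIdx, ih, padFn]


lemma marksAux (xs : List (String × String)) : ∀ s : Int,
    (PySem.List.enumerate xs (s + 1)).filterMap (fun p => if p.2 = pvM then some p.1 else none)
      = ((PySem.List.enumerate xs s).filterMap (fun p => if p.2 = pvM then some p.1 else none)).map (· + 1) := by
  induction xs with
  | nil => intro s; simp [PySem.List.enumerate_nil]
  | cons y ys ih =>
    intro s
    rw [PySem.List.enumerate_cons, PySem.List.enumerate_cons, List.filterMap_cons, List.filterMap_cons]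
    by_cases hy : y = pvM <;> simp [hy, ih (s + 1)]

lemma marksB_cons (x : String × String) (xs : List (String × String)) :
    marksB (x :: xs) =
      (if x = pvM then [(0 : Int)] else []) ++ (marksB xs).map (· + 1) := by
  unfold marksB
  rw [PySem.List.enumerate_cons, List.filterMap_cons, marksAux xs 0]
  by_cases hx : x = pvM <;> simp [hx]


lemma marksB_nonneg (l : List (String × String)) : ∀ m ∈ marksB l, 0 ≤ m := by
  induction l with
  | nil => simp [marksB, PySem.List.enumerate_nil]
  | cons x xs ih =>
    rw [marksB_cons]
    intro m hm
    rcases List.mem_append.1 hm with hm | hm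
    · split_ifs at hm <;> simp at hm; omega
    · obtain ⟨m', hm', rfl⟩ := List.mem_map.1 hm
      have := ih m' hm'
      omega


lemma slice_cons_succ (x : String × String) (xs : List (String × String)) (a b : Int)
    (ha : 0 ≤ a) (hb : 0 ≤ b) :
    PySem.List.slice (x :: xs) (some (a + 1)) (some (b + 1)) = PySem.List.slice xs (some a) (some b) := by
  rw [PySem.List.slice_toNat _ (by omega) (by omega), PySem.List.slice_toNat _ ha hb]
  have h1 : (a + 1).toNat = a.toNat + 1 := by omega
  have h2 : (b + 1).toNat = b.toNat + 1 := by omega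
  rw [h1, h2]
  simp [List.drop_succ_cons]


lemma chunksIdx_shift (x : String × String) (core : List (String × String)) :
    ∀ (ms : List Int) (p : Int), -1 ≤ p → (∀ m ∈ ms, 0 ≤ m) →
      chunksIdx (x :: core) (p + 1) (ms.map (· + 1)) = chunksIdx core p ms := by
  intro ms
  induction ms with
  | nil => intro p _ _; simp [chunksIdx]
  | cons m ms ih =>
    intro p hp hms
    have hm : 0 ≤ m := hms m (by simp)
    simp only [List.map_cons, chunksIdx]
    rw [slice_cons_succ _ _ _ _ (by omega) hm]
    rw [ih m (by omega) (fun m' hm' => hms m' (by simp [hm']))]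


lemma slice_cons_head (x : String × String) (xs : List (String × String)) (b : Int) (hb : 0 ≤ b) :
    PySem.List.slice (x :: xs) none (some (b + 1)) = x :: PySem.List.slice xs none (some b) := by
  rw [PySem.List.slice_to _ (by omega), PySem.List.slice_to _ hb]
  have h2 : (b + 1).toNat = b.toNat + 1 := by omega
  simp [h2]

lemma slice_empty_zero (core : List (String × String)) :
    PySem.List.slice core none (some 0) = [] := by
  rw [PySem.List.slice_to _ le_rfl]
  simp

lemma chunksIdx_marks (core : List (String × String)) :
    chunksIdx core (-1) (marksB core ++ [(core.length : Int)]) = chunks core := by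
  induction core with
  | nil =>
    simp only [marksB, PySem.List.enumerate_nil, List.filterMap_nil, List.nil_append,
      List.length_nil, Nat.cast_zero, chunksIdx, chunks]
    norm_num [slice_empty_zero]
  | cons x xs ih =>
    have hnn : ∀ m ∈ marksB xs ++ [(xs.length : Int)], 0 ≤ m := by
      intro m hm
      rcases List.mem_append.1 hm with hm | hm
      · exact marksB_nonneg xs m hm
      · simp at hm; omega
    have hlen : ((x :: xs).length : Int) = (xs.length : Int) + 1 := by push_cast [List.length_cons]; ring
    rw [marksB_cons, hlen]
    by_cases hx : x = pvM
    · rw [if_pos hx]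
      have hmap : (marksB xs).map (· + 1) ++ [(xs.length : Int) + 1]
          = (marksB xs ++ [(xs.length : Int)]).map (· + 1) := by simp
      have hshift := chunksIdx_shift x xs (marksB xs ++ [(xs.length : Int)]) (-1) (by norm_num) hnn
      norm_num at hshift
      simp only [List.singleton_append, List.cons_append, chunksIdx]
      rw [List.append_assoc, hmap]
      subst hx
      rw [chunks_cons_mark]
      norm_num [slice_empty_zero, hshift, ih]
    · rw [if_neg hx]
      obtain ⟨m, rest, hmr⟩ : ∃ m rest, marksB xs ++ [(xs.length : Int)] = m :: rest := by
        cases marksB xs <;> exact ⟨_, _, rfl⟩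
      have hm0 : 0 ≤ m := hnn m (by rw [hmr]; simp)
      have hrest : ∀ m' ∈ rest, 0 ≤ m' := fun m' hm' => hnn m' (by rw [hmr]; simp [hm'])
      have ih' := ih
      rw [hmr] at ih'
      simp only [chunksIdx] at ih'
      norm_num at ih'
      have hmap : (marksB xs).map (· + 1) ++ [(xs.length : Int) + 1]
          = (m :: rest).map (· + 1) := by rw [← hmr]; simp
      rw [List.nil_append, hmap]
      simp only [List.map_cons, chunksIdx]
      norm_num
      rw [slice_cons_head x xs m hm0]
      have hshift := chunksIdx_shift x xs rest m (by omega) hrest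
      rw [hshift]
      exact (chunks_cons_tok x xs hx _ _ ih'.symm).symm


lemma dropWhile_head_ne (l : List (String × String)) (y : String × String)
    (ys : List (String × String)) (h : l.dropWhile pvP = y :: ys) : y ≠ pvM := by
  induction l with
  | nil => simp at h
  | cons x xs ih =>
    rw [List.dropWhile_cons] at h
    by_cases hx : x = pvM
    · rw [if_pos (by simp [pvP, hx])] at h
      exact ih h
    · rw [if_neg (by simp [pvP, hx])] at h
      injection h with h1 _
      exact h1 ▸ hx

lemma drop_len_takeWhile (l : List (String × String)) :
    l.drop (l.takeWhile pvP).length = l.dropWhile pvP := by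
  induction l with
  | nil => simp
  | cons x xs ih =>
    by_cases hx : pvP x <;> simp [List.takeWhile_cons, List.dropWhile_cons, hx, ih]

-- ===== VERDICT (by name: the statement is the Claim_ definition above) =====
theorem fix_sentence_boundaries_spec : Claim_equal_fix_sentence_boundaries := by
  intro data _ hPre
  unfold Spec_fix_sentence_boundaries
  have hd1 := stripFront_eq data hPre
  set d1 := data.dropWhile pvP with hd1def
  have hd1ne : d1 ≠ [] := by
    intro hnil
    have hall := List.dropWhile_eq_nil_iff.mp hnil
    obtain ⟨e, he, hne⟩ := hPre
    exact hne (by simpa [pvP] using hall e he)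
  obtain ⟨y, ys, hyys⟩ : ∃ y ys, d1 = y :: ys := by
    cases h : d1 with
    | nil => exact absurd h hd1ne
    | cons y ys => exact ⟨y, ys, rfl⟩
  have hyne : y ≠ pvM := dropWhile_head_ne data y ys (hd1def ▸ hyys)
  have hex1 : ∃ e ∈ d1, e ≠ pvM := ⟨y, by rw [hyys]; simp, hyne⟩
  have hexr : ∃ e ∈ d1.reverse, e ≠ pvM := by
    obtain ⟨e, he, hne⟩ := hex1
    exact ⟨e, List.mem_reverse.2 he, hne⟩
  have hd2eq := stripBack_rev d1.reverse hexr
  rw [List.reverse_reverse] at hd2eq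
  set d2 := ((d1.reverse.dropWhile pvP).reverse) with hd2def
  have hdwne : d1.reverse.dropWhile pvP ≠ [] := by
    intro hnil
    have hall := List.dropWhile_eq_nil_iff.mp hnil
    obtain ⟨e, he, hne⟩ := hexr
    exact hne (by simpa [pvP] using hall e he)
  have hd2ne : d2 ≠ [] := by
    rw [hd2def]
    simpa using hdwne
  have hd2last : d2.getLast? ≠ some pvM := by
    rw [hd2def, List.getLast?_reverse]
    obtain ⟨z, zs, hzzs⟩ : ∃ z zs, d1.reverse.dropWhile pvP = z :: zs := by
      cases h : d1.reverse.dropWhile pvP with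
      | nil => exact absurd h hdwne
      | cons z zs => exact ⟨z, zs, rfl⟩
    rw [hzzs]
    simpa using dropWhile_head_ne d1.reverse z zs hzzs
  obtain ⟨c, cs, hc⟩ : ∃ c cs, chunks d2 = c :: cs := by
    cases h : chunks d2 with
    | nil => exact absurd h (chunks_ne_nil d2)
    | cons c cs => exact ⟨c, cs, rfl⟩
  have hlast := chunks_getLast_ne_nil d2 hd2ne hd2last
  rw [hc] at hlast
  have hg : (c :: cs).getLast? = some ((c :: cs).getLast (by simp)) :=
    List.getLast?_eq_some_getLast (by simp)
  have hgne : (c :: cs).getLast (by simp) ≠ [] := by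
    intro h
    exact hlast (by rw [hg, h])
  -- evaluate port A
  unfold fix_sentence_boundaries
  simp only [hd1, hd2eq]
  simp only [foldA d2 ([]) ([]), hc, consHead, List.nil_append, hg, Option.getD_some]
  rw [if_pos hgne]
  have hA : ((c :: cs).dropLast).map padFn ++ [padFn ((c :: cs).getLast (by simp))]
      = (c :: cs).map padFn := by
    conv_rhs => rw [← List.dropLast_concat_getLast (l := c :: cs) (by simp)]
    simp
  -- evaluate port B
  unfold fix_sentence_boundaries_alt
  simp only [cntLead_eq, drop_len_takeWhile, ← hd1def]
  have hd1len : (data.takeWhile pvP).length + d1.length = data.length := by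
    rw [hd1def, ← List.length_append, List.takeWhile_append_dropWhile]
  have ht_le : (d1.reverse.takeWhile pvP).length + (d1.reverse.dropWhile pvP).length = d1.length := by
    rw [← List.length_append, List.takeWhile_append_dropWhile, List.length_reverse]
  have htak : data.length - (d1.reverse.takeWhile pvP).length - (data.takeWhile pvP).length
      = d1.length - (d1.reverse.takeWhile pvP).length := by omega
  rw [htak]
  have hcore : d1.take (d1.length - (d1.reverse.takeWhile pvP).length) = d2 := by
    rw [hd2def, ← drop_len_takeWhile d1.reverse, List.drop_reverse, List.reverse_reverse]
  rw [hcore, if_neg hd2ne, bLoop_eq, chunksIdx_marks, hc]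
  exact hA
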